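-- pv_equiv track=rewrite | github.com/LovingCivilian/madany-pdf-batcher | ui/processing.py | _check_selection
-- ===== SOURCE A (Python) =====
-- def _check_selection(idx, total, cfg):
--     mode = cfg.get("page_selection", "all")
--     custom_str = cfg.get("custom_pages", "")
--     pno = idx + 1
--     if mode == "all":
--         return True
--     if mode == "first":
--         return pno == 1
--     if mode == "last":
--         return pno == total
--     if mode == "odd":
--         return (pno % 2) == 1
--     if mode == "even":
--         return (pno % 2) == 0
--     if mode == "custom":
--         pages = set()
--         for part in custom_str.split(","):
--             part = part.strip()
--             if "-" in part:
--                 try: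
--                     s, e = map(int, part.split("-", 1))
--                     if s > e:
--                         s, e = e, s
--                     pages.update(range(s, e + 1))
--                 except Exception:
--                     continue
--             else:
--                 try:
--                     pages.add(int(part))
--                 except Exception:
--                     continue
--         return pno in pages
--     return False
-- ===== SOURCE B (Python) =====
-- def _parse_part(raw):
--     # one comma-separated part -> (lo, hi) inclusive interval, or None if unparsable
--     p = raw.strip()
--     if "-" in p:
--         try:
--             s, e = map(int, p.split("-", 1))
--         except Exception:
--             return None
--         return (min(s, e), max(s, e))
--     try:
--         n = int(p)
--     except Exception:
--         return None
--     return (n, n)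
--
-- def _check_selection(idx, total, cfg):
--     pno = idx + 1
--     mode = cfg.get("page_selection", "all")
--     if mode == "custom":
--         # parse each part into an interval and short-circuit on the first hit
--         for part in cfg.get("custom_pages", "").split(","):
--             iv = _parse_part(part)
--             if iv is not None and iv[0] <= pno <= iv[1]:
--                 return True
--         return False
--     # table of the fixed modes; unknown modes select nothing
--     return {
--         "all": True,
--         "first": pno == 1,
--         "last": pno == total,
--         "odd": pno % 2 == 1,
--         "even": pno % 2 == 0,
--     }.get(mode, False)
-- ===== Notes on version B (the rewrite author's own statement) =====
-- stated objective: alternative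
-- what changed: The if-else mode chain is replaced by a lookup table for the fixed modes, and the custom branch no longer materialises the whole page set (pages.update(range(s,e+1)) then one membership test): B parses each comma-separated part into an inclusive (lo,hi) interval and short-circuits on the first interval containing the page number.
import Mathlib
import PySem

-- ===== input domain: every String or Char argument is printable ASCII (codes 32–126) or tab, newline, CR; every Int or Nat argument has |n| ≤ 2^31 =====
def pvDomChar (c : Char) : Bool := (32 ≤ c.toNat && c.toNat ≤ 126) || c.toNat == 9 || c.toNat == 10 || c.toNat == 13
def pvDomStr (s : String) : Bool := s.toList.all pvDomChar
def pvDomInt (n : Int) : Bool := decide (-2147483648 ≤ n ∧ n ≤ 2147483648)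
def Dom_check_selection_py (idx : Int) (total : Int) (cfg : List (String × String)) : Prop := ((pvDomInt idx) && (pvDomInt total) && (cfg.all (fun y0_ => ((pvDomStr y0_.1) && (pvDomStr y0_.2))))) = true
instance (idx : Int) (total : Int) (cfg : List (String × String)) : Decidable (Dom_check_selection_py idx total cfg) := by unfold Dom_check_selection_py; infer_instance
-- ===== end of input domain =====

-- B replaces A's if-else mode chain + "build the full page set then one membership test" by a
-- lookup table for the fixed modes and, for "custom", a single short-circuit pass that parses
-- each part into an inclusive interval and tests the page number against it: alternative decomposition.


-- ===== PORT A =====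
-- loop body of A's 'for part in custom_str.split(",")' (builds the page set);
-- s.split(",") is total (separator non-empty), so the '.getD []' default is never taken
def pvAddPart (pages : PySem.Set Int) (rawPart : String) : PySem.Set Int :=
  let part := PySem.Str.strip rawPart
  if PySem.Str.isIn "-" part then
    -- try: s, e = map(int, part.split("-", 1)) … except Exception: continue
    match PySem.Str.splitMax? part "-" 1 with
    | some [sa, ea] =>
      match PySem.Int.ofStr? sa, PySem.Int.ofStr? ea with
      | some s, some e =>
        let p := if s > e then (e, s) else (s, e)     -- if s > e: s, e = e, s
        PySem.Set.update pages (PySem.List.pyRange p.1 (p.2 + 1) 1)  -- pages.update(range(s, e+1))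
      | _, _ => pages
    | _ => pages
  else
    -- try: pages.add(int(part)) … except Exception: continue
    match PySem.Int.ofStr? part with
    | some n => PySem.Set.add pages n
    | none => pages

def check_selection_py (idx : Int) (total : Int) (cfg : List (String × String)) : Bool :=
  let mode := (cfg.lookup "page_selection").getD "all"
  let custom_str := (cfg.lookup "custom_pages").getD ""
  let pno := idx + 1
  if mode = "all" then true
  else if mode = "first" then pno == 1
  else if mode = "last" then pno == total
  else if mode = "odd" then PySem.Int.mod pno 2 == 1
  else if mode = "even" then PySem.Int.mod pno 2 == 0
  else if mode = "custom" then
    let pages := ((PySem.Str.split? custom_str ",").getD []).foldl pvAddPart PySem.Set.empty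
    PySem.Set.contains pages pno
  else false

-- ===== PORT B =====
-- _parse_part: one comma-separated part -> some (lo, hi) inclusive interval, none if unparsable
def pvParsePart (raw : String) : Option (Int × Int) :=
  let p := PySem.Str.strip raw
  if PySem.Str.isIn "-" p then
    match PySem.Str.splitMax? p "-" 1 with
    | some [sa, ea] =>
      match PySem.Int.ofStr? sa, PySem.Int.ofStr? ea with
      | some s, some e => some (min s e, max s e)
      | _, _ => none
    | _ => none
  else
    (PySem.Int.ofStr? p).map (fun n => (n, n))

def check_selection_py_alt (idx : Int) (total : Int) (cfg : List (String × String)) : Bool :=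
  let pno := idx + 1
  let mode := (cfg.lookup "page_selection").getD "all"
  if mode = "custom" then
    -- parse each part into an interval and short-circuit on the first hit
    ((PySem.Str.split? ((cfg.lookup "custom_pages").getD "") ",").getD []).any
      (fun part => match pvParsePart part with
        | some iv => decide (iv.1 ≤ pno ∧ pno ≤ iv.2)
        | none => false)
  else
    -- table of the fixed modes; unknown modes select nothing
    (([("all", true), ("first", pno == 1), ("last", pno == total),
       ("odd", PySem.Int.mod pno 2 == 1), ("even", PySem.Int.mod pno 2 == 0)]
      : List (String × Bool)).lookup mode).getD false

-- ===== PRECONDITION & SPEC =====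
def Spec_check_selection_py (idx : Int) (total : Int) (cfg : List (String × String)) (out : Bool) : Prop := out = check_selection_py_alt idx total cfg
instance (idx : Int) (total : Int) (cfg : List (String × String)) (out : Bool) : Decidable (Spec_check_selection_py idx total cfg out) := by unfold Spec_check_selection_py; infer_instance

-- ===== CLAIM (what is proved, stated in full; the proofs are below) =====
def Claim_equal_check_selection_py : Prop := ∀ (idx : Int) (total : Int) (cfg : List (String × String)), Dom_check_selection_py idx total cfg → Spec_check_selection_py idx total cfg (check_selection_py idx total cfg)

-- ===== LEMMAS AND PROOFS =====

-- B's per-part test, as a function (the lambda in check_selection_py_alt's custom branch)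
def pvHit (pno : Int) (part : String) : Bool :=
  match pvParsePart part with
  | some iv => decide (iv.1 ≤ pno ∧ pno ≤ iv.2)
  | none => false

-- one step of A's set-building loop adds exactly the pages B's interval test accepts
lemma pv_mem_addPart (pno : Int) (acc : PySem.Set Int) (rawPart : String) :
    pno ∈ pvAddPart acc rawPart ↔ (pno ∈ acc ∨ pvHit pno rawPart = true) := by
  delta pvAddPart pvHit pvParsePart
  by_cases hin : PySem.Str.isIn "-" (PySem.Str.strip rawPart) = true
  · rw [if_pos hin]
    simp only [hin, if_pos]
    rcases h : PySem.Str.splitMax? (PySem.Str.strip rawPart) "-" 1 with _ | ⟨_ | ⟨sa, _ | ⟨ea, _ | _⟩⟩⟩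
    · simp
    · simp
    · simp
    · rcases hs : PySem.Int.ofStr? sa with _ | s <;> rcases he : PySem.Int.ofStr? ea with _ | e
      · simp [hs, he]
      · simp [hs, he]
      · simp [hs, he]
      · by_cases hse : s > e <;>
          simp only [hs, he, hse, reduceIte, PySem.Set.mem_update, PySem.List.mem_pyRange_one,
            decide_eq_true_eq] <;>
          exact or_congr Iff.rfl (by omega)
    · simp
  · rw [if_neg hin]
    simp only [hin, Bool.false_eq_true, if_false]
    rcases h : PySem.Int.ofStr? (PySem.Str.strip rawPart) with _ | n
    · simp
    · rw [PySem.Set.mem_add]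
      simp only [Option.map_some, decide_eq_true_eq]
      exact or_congr Iff.rfl (by omega)

-- the whole loop: membership in A's built set ↔ some part's interval contains pno
lemma pv_mem_foldl (pno : Int) (parts : List String) (acc : PySem.Set Int) :
    pno ∈ parts.foldl pvAddPart acc ↔ (pno ∈ acc ∨ parts.any (pvHit pno) = true) := by
  induction parts generalizing acc with
  | nil => simp
  | cons p ps ih =>
    rw [List.foldl_cons, List.any_cons, ih, pv_mem_addPart, Bool.or_eq_true]
    exact or_assoc

-- the custom branch of A equals the custom branch of B
lemma pv_custom_eq (pno : Int) (parts : List String) :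
    PySem.Set.contains (parts.foldl pvAddPart PySem.Set.empty) pno = parts.any (pvHit pno) := by
  rcases h : parts.any (pvHit pno) with _ | _
  · rw [← Bool.not_eq_true, PySem.Set.contains_iff, pv_mem_foldl]
    rintro (hc | hc)
    · simp [PySem.Set.empty] at hc
    · simp [h] at hc
  · rw [PySem.Set.contains_iff, pv_mem_foldl]
    exact Or.inr h

-- the whole dispatch: A's if-chain = B's custom-first + table lookup, for any mode string
lemma pv_dispatch (pno total : Int) (mode cs : String) :
    (if mode = "all" then true
     else if mode = "first" then pno == 1
     else if mode = "last" then pno == total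
     else if mode = "odd" then PySem.Int.mod pno 2 == 1
     else if mode = "even" then PySem.Int.mod pno 2 == 0
     else if mode = "custom" then
       PySem.Set.contains (((PySem.Str.split? cs ",").getD []).foldl pvAddPart PySem.Set.empty) pno
     else false)
    = (if mode = "custom" then
         ((PySem.Str.split? cs ",").getD []).any (pvHit pno)
       else
         (([("all", true), ("first", pno == 1), ("last", pno == total),
            ("odd", PySem.Int.mod pno 2 == 1), ("even", PySem.Int.mod pno 2 == 0)]
           : List (String × Bool)).lookup mode).getD false) := by
  by_cases h1 : mode = "all"
  · subst h1; simp [List.lookup]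
  by_cases h2 : mode = "first"
  · subst h2; simp [List.lookup]
  by_cases h3 : mode = "last"
  · subst h3; simp [List.lookup]
  by_cases h4 : mode = "odd"
  · subst h4; simp [List.lookup]
  by_cases h5 : mode = "even"
  · subst h5; simp [List.lookup]
  by_cases h6 : mode = "custom"
  · subst h6; simp only [String.reduceEq, reduceIte]; exact pv_custom_eq pno _
  · have e1 : (mode == "all") = false := by simpa using h1
    have e2 : (mode == "first") = false := by simpa using h2
    have e3 : (mode == "last") = false := by simpa using h3
    have e4 : (mode == "odd") = false := by simpa using h4
    have e5 : (mode == "even") = false := by simpa using h5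
    simp [List.lookup, e1, e2, e3, e4, e5, h1, h2, h3, h4, h5, h6]

-- ===== VERDICT (by name: the statement is the Claim_ definition above) =====
theorem check_selection_py_spec : Claim_equal_check_selection_py := by
  intro idx total cfg _
  unfold Spec_check_selection_py
  delta check_selection_py check_selection_py_alt
  exact pv_dispatch (idx + 1) total ((cfg.lookup "page_selection").getD "all")
    ((cfg.lookup "custom_pages").getD "")
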